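-- pv_equiv track=rewrite | github.com/pypi-data/pypi-mirror-397 | packages/country-iso2ify/country_iso2ify-0.1.3.tar.gz/country_iso2ify-0.1.3/src/country_iso2ify/resolver.py | _pick_csv_field
-- ===== SOURCE A (Python) =====
-- def _pick_csv_field(
--     fieldnames: list[str],
--     candidates: list[str],
-- ) -> str | None:
--     lowered = {name.lower(): name for name in fieldnames}
--     for candidate in candidates:
--         if candidate in lowered:
--             return lowered[candidate]
--     return None
-- ===== SOURCE B (Python) =====
-- def _pick_csv_field(
--     fieldnames: list[str],
--     candidates: list[str],
-- ) -> str | None: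
--     best = None
--     for name in fieldnames:
--         low = name.lower()
--         if low in candidates:
--             i = candidates.index(low)
--             if best is None or i <= best[0]:
--                 best = (i, name)
--     return best[1] if best is not None else None
-- ===== Notes on version B (the rewrite author's own statement) =====
-- stated objective: alternative
-- what changed: Inverts the traversal: instead of indexing fieldnames by lowercase and probing candidates in order, B makes a single pass over fieldnames tracking the match with the minimum candidate index (later fieldname wins ties, matching the dict overwrite), with no dict built.
import Mathlib
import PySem

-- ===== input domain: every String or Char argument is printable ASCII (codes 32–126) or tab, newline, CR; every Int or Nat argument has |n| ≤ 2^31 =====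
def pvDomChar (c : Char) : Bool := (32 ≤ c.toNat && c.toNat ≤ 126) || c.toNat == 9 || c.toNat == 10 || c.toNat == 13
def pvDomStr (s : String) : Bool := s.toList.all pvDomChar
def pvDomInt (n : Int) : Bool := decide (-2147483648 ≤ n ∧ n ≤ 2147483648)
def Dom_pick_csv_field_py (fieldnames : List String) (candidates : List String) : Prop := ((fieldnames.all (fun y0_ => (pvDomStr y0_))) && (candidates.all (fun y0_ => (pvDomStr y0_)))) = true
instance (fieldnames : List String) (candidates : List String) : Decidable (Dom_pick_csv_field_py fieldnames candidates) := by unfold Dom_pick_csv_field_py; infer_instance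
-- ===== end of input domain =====

-- B inverts the traversal: one pass over fieldnames tracking the match with the
-- minimum candidate index (later fieldname wins ties, like the dict overwrite);
-- objective: alternative (no dict built).

-- ===== PORT A =====
-- the loop 'for candidate in candidates: if candidate in lowered: return lowered[candidate]'
def pickLoopA (lowered : PySem.Dict String String) : List String → Option String
  | [] => none
  | c :: rest => if lowered.contains c then lowered.get? c else pickLoopA lowered rest

def pick_csv_field_py (fieldnames : List String) (candidates : List String) : Option String :=
  let lowered : PySem.Dict String String :=
    fieldnames.foldl (fun d name => d.insert (PySem.Str.lower name) name) PySem.Dict.empty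
  pickLoopA lowered candidates

-- ===== PORT B =====
-- loop body: 'low = name.lower(); if low in candidates: i = candidates.index(low);
--             if best is None or i <= best[0]: best = (i, name)'
def stepB (candidates : List String) (best : Option (Nat × String)) (name : String) : Option (Nat × String) :=
  let low := PySem.Str.lower name
  if candidates.contains low then
    match PySem.List.index? candidates low with
    | some i =>
      match best with
      | none => some (i, name)
      | some b => if i ≤ b.1 then some (i, name) else some b
    | none => best
  else best

def pick_csv_field_py_alt (fieldnames : List String) (candidates : List String) : Option String :=
  (fieldnames.foldl (stepB candidates) none).map (·.2)

-- ===== PRECONDITION & SPEC =====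
def Spec_pick_csv_field_py (fieldnames : List String) (candidates : List String) (out : Option String) : Prop := out = pick_csv_field_py_alt fieldnames candidates
instance (fieldnames : List String) (candidates : List String) (out : Option String) : Decidable (Spec_pick_csv_field_py fieldnames candidates out) := by unfold Spec_pick_csv_field_py; infer_instance

-- ===== CLAIM =====
def Claim_equal_pick_csv_field_py : Prop := ∀ (fieldnames : List String) (candidates : List String), Dom_pick_csv_field_py fieldnames candidates → Spec_pick_csv_field_py fieldnames candidates (pick_csv_field_py fieldnames candidates)

-- ===== LEMMAS AND PROOFS =====

-- last case-insensitive match of a candidate in fieldnames (= the dict's stored value)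
def lastMatch (fieldnames : List String) (candidate : String) : Option String :=
  fieldnames.foldl (fun acc name => if PySem.Str.lower name == candidate then some name else acc) none

-- first candidate with a match, together with its index (offset form)
def hitIdxAux (fns : List String) (i : Nat) : List String → Option (Nat × String)
  | [] => none
  | c :: rest =>
    match lastMatch fns c with
    | some m => some (i, m)
    | none => hitIdxAux fns (i + 1) rest

-- first candidate with a match (value only) — A's result shape
def findHit (fns : List String) : List String → Option String
  | [] => none
  | c :: rest =>
    match lastMatch fns c with
    | some m => some m
    | none => findHit fns rest

-- ---- A-side ----
theorem get?_fold_insert_lower (l : List String) (d : PySem.Dict String String) (c : String) :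
    (l.foldl (fun d name => d.insert (PySem.Str.lower name) name) d).get? c
      = l.foldl (fun acc name => if PySem.Str.lower name == c then some name else acc) (d.get? c) := by
  induction l generalizing d with
  | nil => rfl
  | cons n l ih =>
      simp only [List.foldl_cons, ih, PySem.Dict.get?_insert]
      congr 1
      by_cases h : PySem.Str.lower n = c
      · simp [h]
      · simp [h, Ne.symm h]

theorem get?_eq_lastMatch (fieldnames : List String) (c : String) :
    (fieldnames.foldl (fun d name => d.insert (PySem.Str.lower name) name)
        PySem.Dict.empty).get? c = lastMatch fieldnames c := by
  rw [get?_fold_insert_lower]; rfl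

theorem pickLoopA_eq_findHit (fieldnames : List String) (candidates : List String) :
    pickLoopA (fieldnames.foldl (fun d name => d.insert (PySem.Str.lower name) name) PySem.Dict.empty) candidates
      = findHit fieldnames candidates := by
  induction candidates with
  | nil => rfl
  | cons c rest ih =>
      rw [pickLoopA, findHit, ← ih,
        PySem.Dict.contains_eq_isSome_get?, get?_eq_lastMatch]
      cases h : lastMatch fieldnames c <;> simp

-- ---- B-side ----
theorem hitIdxAux_ge (fns : List String) (cands : List String) (i : Nat) (k : Nat) (m : String)
    (h : hitIdxAux fns i cands = some (k, m)) : i ≤ k := by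
  induction cands generalizing i with
  | nil => simp [hitIdxAux] at h
  | cons c rest ih =>
      rw [hitIdxAux] at h
      cases hl : lastMatch fns c with
      | some m' => rw [hl] at h; simp at h; omega
      | none => rw [hl] at h; exact Nat.le_of_succ_le (ih (i + 1) h)

theorem lastMatch_concat (fns : List String) (n c : String) :
    lastMatch (fns ++ [n]) c = if PySem.Str.lower n == c then some n else lastMatch fns c := by
  simp [lastMatch]

theorem hitIdxAux_nil_fns (cands : List String) (i : Nat) : hitIdxAux [] i cands = none := by
  induction cands generalizing i with
  | nil => rfl
  | cons c rest ih => rw [hitIdxAux]; simpa [lastMatch] using ih (i + 1)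

-- main key lemma: effect of appending one fieldname
theorem hitIdxAux_concat (fns : List String) (n : String) (cands : List String) (i : Nat) :
    hitIdxAux (fns ++ [n]) i cands =
      match PySem.List.index? cands (PySem.Str.lower n) with
      | none => hitIdxAux fns i cands
      | some j =>
        match hitIdxAux fns i cands with
        | none => some (i + j, n)
        | some (k, m) => if i + j ≤ k then some (i + j, n) else some (k, m) := by
  induction cands generalizing i with
  | nil => rfl
  | cons c rest ih =>
      by_cases hc : c = PySem.Str.lower n
      · subst hc
        rw [PySem.List.index?_cons_self]
        rw [hitIdxAux, hitIdxAux, lastMatch_concat]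
        simp only [beq_self_eq_true, if_true]
        cases hl : lastMatch fns (PySem.Str.lower n) with
        | some m => simp
        | none =>
            cases hr : hitIdxAux fns (i + 1) rest with
            | none => simp
            | some km =>
                obtain ⟨k, m⟩ := km
                have hk := hitIdxAux_ge fns rest (i + 1) k m hr
                simp [Nat.le_of_succ_le hk]
      · rw [PySem.List.index?_cons_of_ne rest hc]
        rw [hitIdxAux, hitIdxAux, lastMatch_concat]
        have hln : ¬ (PySem.Str.lower n == c) = true := by
          simpa using fun h => hc h.symm
        rw [if_neg hln]
        cases hl : lastMatch fns c with
        | some m =>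
            cases hj : PySem.List.index? rest (PySem.Str.lower n) with
            | none => simp
            | some j' =>
                simp only [Option.map_some]
                have : ¬ (i + (j' + 1) ≤ i) := by omega
                simp [this]
        | none =>
            rw [ih (i + 1)]
            cases hj : PySem.List.index? rest (PySem.Str.lower n) with
            | none => simp
            | some j' =>
                simp only [Option.map_some]
                have h1 : i + (j' + 1) = (i + 1) + j' := by omega
                rw [h1]

theorem foldB_eq_hitIdxAux (cands : List String) (fns : List String) :
    fns.foldl (stepB cands) none = hitIdxAux fns 0 cands := by
  induction fns using List.reverseRecOn with
  | nil => exact (hitIdxAux_nil_fns cands 0).symm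
  | append_singleton fns n ih =>
      rw [List.foldl_append, List.foldl_cons, List.foldl_nil, ih, hitIdxAux_concat]
      unfold stepB
      cases hj : PySem.List.index? cands (PySem.Str.lower n) with
      | none =>
          have hnm : PySem.Str.lower n ∉ cands := (PySem.List.index?_eq_none_iff cands (PySem.Str.lower n)).mp hj
          simp
          exact fun h => absurd h hnm
      | some j =>
          have hmem : PySem.Str.lower n ∈ cands :=
            (PySem.List.index?_isSome_iff cands (PySem.Str.lower n)).mp (by rw [hj]; rfl)
          have hct : cands.contains (PySem.Str.lower n) = true := by simpa using hmem
          simp only [hct, if_true, hj]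
          cases hr : hitIdxAux fns 0 cands with
          | none => simp
          | some km => obtain ⟨k, m⟩ := km; simp

theorem hitIdxAux_map_snd (fns : List String) (cands : List String) (i : Nat) :
    (hitIdxAux fns i cands).map (·.2) = findHit fns cands := by
  induction cands generalizing i with
  | nil => rfl
  | cons c rest ih =>
      rw [hitIdxAux, findHit]
      cases hl : lastMatch fns c with
      | some m => simp
      | none => simpa using ih (i + 1)

theorem alt_eq_findHit (fns : List String) (cands : List String) :
    pick_csv_field_py_alt fns cands = findHit fns cands := by
  rw [pick_csv_field_py_alt, foldB_eq_hitIdxAux, hitIdxAux_map_snd]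

-- ===== VERDICT =====
theorem pick_csv_field_py_spec : Claim_equal_pick_csv_field_py := by
  intro fieldnames candidates _
  unfold Spec_pick_csv_field_py pick_csv_field_py
  rw [alt_eq_findHit]
  exact pickLoopA_eq_findHit fieldnames candidates
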